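-- pv_equiv track=rewrite | github.com/dudleypeacockqa/ma-saas-platform | backend/app/deal_intelligence/due_diligence_automation.py | _categorize_risk_flag
-- ===== SOURCE A (Python) =====
-- def _categorize_risk_flag(flag: str) -> str:
--     """Categorize risk flag into type"""
--     flag_lower = flag.lower()
--
--     if any(term in flag_lower for term in ["financial", "revenue", "cash", "profit"]):
--         return "Financial"
--     elif any(term in flag_lower for term in ["legal", "contract", "liability", "litigation"]):
--         return "Legal"
--     elif any(term in flag_lower for term in ["compliance", "regulatory", "sox", "gdpr"]):
--         return "Compliance"
--     elif any(term in flag_lower for term in ["operational", "process", "system"]):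
--         return "Operational"
--     elif any(term in flag_lower for term in ["environmental", "safety", "health"]):
--         return "Environmental"
--     else:
--         return "Other"
-- ===== SOURCE B (Python) =====
-- _NAMES = ["Financial", "Legal", "Compliance", "Operational", "Environmental", "Other"]
--
-- _TERM_PRIORITY = {
--     "financial": 0, "revenue": 0, "cash": 0, "profit": 0,
--     "legal": 1, "contract": 1, "liability": 1, "litigation": 1,
--     "compliance": 2, "regulatory": 2, "sox": 2, "gdpr": 2,
--     "operational": 3, "process": 3, "system": 3,
--     "environmental": 4, "safety": 4, "health": 4,
-- }
--
-- def _scan_step(f, best, i):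
--     # check which keywords start at position i; keep the minimum priority seen
--     for term, p in _TERM_PRIORITY.items():
--         if p < best and f.startswith(term, i):
--             best = p
--     return best
--
-- def _categorize_risk_flag(flag: str) -> str:
--     # single left-to-right scan of the lowered text (naive multi-pattern matcher
--     # with a min-priority accumulator) instead of a chain of substring tests
--     f = flag.lower()
--     best = 5
--     for i in range(len(f)):
--         best = _scan_step(f, best, i)
--     return _NAMES[best]
-- ===== Notes on version B (the rewrite author's own statement) =====
-- stated objective: alternative
-- what changed: Replaces the priority if/elif chain of whole-string substring tests with one left-to-right scan of the lowered text that, at each position, checks which keywords start there and keeps the minimum-priority category seen (naive multi-pattern matcher with a min accumulator).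
import Mathlib
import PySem

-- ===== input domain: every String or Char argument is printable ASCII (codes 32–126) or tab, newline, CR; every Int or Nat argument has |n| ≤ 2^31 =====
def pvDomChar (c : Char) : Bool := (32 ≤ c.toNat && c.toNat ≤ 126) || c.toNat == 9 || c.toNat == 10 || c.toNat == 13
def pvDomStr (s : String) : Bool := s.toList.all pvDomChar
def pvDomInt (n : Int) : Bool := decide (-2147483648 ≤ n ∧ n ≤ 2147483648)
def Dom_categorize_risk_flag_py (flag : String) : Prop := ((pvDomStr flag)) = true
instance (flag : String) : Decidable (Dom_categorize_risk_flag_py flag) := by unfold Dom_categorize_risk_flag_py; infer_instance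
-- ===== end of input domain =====

-- B replaces A's if/elif chain of substring tests with a single left-to-right scan of the
-- text keeping the minimum-priority keyword category seen; return values identical.

-- ===== PORT A =====
def categorize_risk_flag_py (flag : String) : String :=
  let flag_lower := PySem.Str.lower flag
  if ["financial", "revenue", "cash", "profit"].any (fun term => PySem.Str.isIn term flag_lower) then "Financial"
  else if ["legal", "contract", "liability", "litigation"].any (fun term => PySem.Str.isIn term flag_lower) then "Legal"
  else if ["compliance", "regulatory", "sox", "gdpr"].any (fun term => PySem.Str.isIn term flag_lower) then "Compliance"
  else if ["operational", "process", "system"].any (fun term => PySem.Str.isIn term flag_lower) then "Operational"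
  else if ["environmental", "safety", "health"].any (fun term => PySem.Str.isIn term flag_lower) then "Environmental"
  else "Other"

-- ===== PORT B =====
def riskNames : List String :=
  ["Financial", "Legal", "Compliance", "Operational", "Environmental", "Other"]

-- the _TERM_PRIORITY dict, in insertion (= .items()) order
def riskTerms : List (List Char × Nat) :=
  [("financial".toList, 0), ("revenue".toList, 0), ("cash".toList, 0), ("profit".toList, 0),
   ("legal".toList, 1), ("contract".toList, 1), ("liability".toList, 1), ("litigation".toList, 1),
   ("compliance".toList, 2), ("regulatory".toList, 2), ("sox".toList, 2), ("gdpr".toList, 2),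
   ("operational".toList, 3), ("process".toList, 3), ("system".toList, 3),
   ("environmental".toList, 4), ("safety".toList, 4), ("health".toList, 4)]

-- _scan_step: f.startswith(term, i) with 0 ≤ i < len f is exactly startswith on (f.drop i)
def riskScanStep (f : List Char) (best : Nat) (i : Nat) : Nat :=
  riskTerms.foldl
    (fun best tp => if tp.2 < best ∧ PySem.Chars.startswith (f.drop i) tp.1 then tp.2 else best)
    best

def categorize_risk_flag_py_alt (flag : String) : String :=
  let f := (PySem.Str.lower flag).toList
  -- _NAMES[best]: exact, since best ≤ 5 < 6 = len _NAMES always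
  riskNames.getD ((List.range f.length).foldl (riskScanStep f) 5) "Other"

-- ===== PRECONDITION & SPEC =====
def Spec_categorize_risk_flag_py (flag : String) (out : String) : Prop := out = categorize_risk_flag_py_alt flag
instance (flag : String) (out : String) : Decidable (Spec_categorize_risk_flag_py flag out) := by unfold Spec_categorize_risk_flag_py; infer_instance

-- ===== CLAIM =====
def Claim_equal_categorize_risk_flag_py : Prop := ∀ (flag : String), Dom_categorize_risk_flag_py flag → Spec_categorize_risk_flag_py flag (categorize_risk_flag_py flag)

-- ===== LEMMAS AND PROOFS =====

-- some term of priority p occurs in f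
def riskHit (f : List Char) (p : Nat) : Prop :=
  ∃ tp ∈ riskTerms, tp.2 = p ∧ PySem.Chars.isIn tp.1 f = true

-- inner fold (one position): generic over the boolean test g
theorem inner_le (g : List Char × Nat → Bool) (ts : List (List Char × Nat)) (best : Nat) :
    ts.foldl (fun b tp => if tp.2 < b ∧ g tp then tp.2 else b) best ≤ best := by
  induction ts generalizing best with
  | nil => exact le_refl _
  | cons tp ts ih =>
    simp only [List.foldl_cons]
    split_ifs with h
    · exact le_trans (ih _) (le_of_lt h.1)
    · exact ih _

theorem inner_cases (g : List Char × Nat → Bool) (ts : List (List Char × Nat)) (best : Nat) :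
    ts.foldl (fun b tp => if tp.2 < b ∧ g tp then tp.2 else b) best = best ∨
      ∃ tp ∈ ts, ts.foldl (fun b tp => if tp.2 < b ∧ g tp then tp.2 else b) best = tp.2 ∧ g tp = true := by
  induction ts generalizing best with
  | nil => exact Or.inl rfl
  | cons tp ts ih =>
    simp only [List.foldl_cons]
    split_ifs with h
    · rcases ih tp.2 with h' | ⟨tp', htp', h'⟩
      · exact Or.inr ⟨tp, List.mem_cons_self, h', h.2⟩
      · exact Or.inr ⟨tp', List.mem_cons_of_mem _ htp', h'⟩
    · rcases ih best with h' | ⟨tp', htp', h'⟩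
      · exact Or.inl h'
      · exact Or.inr ⟨tp', List.mem_cons_of_mem _ htp', h'⟩

theorem inner_min (g : List Char × Nat → Bool) (ts : List (List Char × Nat)) (best : Nat)
    (tp : List Char × Nat) (hmem : tp ∈ ts) (hg : g tp = true) :
    ts.foldl (fun b tp => if tp.2 < b ∧ g tp then tp.2 else b) best ≤ tp.2 := by
  induction ts generalizing best with
  | nil => cases hmem
  | cons tp0 ts ih =>
    simp only [List.foldl_cons]
    rcases List.mem_cons.1 hmem with rfl | hmem'
    · split_ifs with h
      · exact inner_le _ _ _
      · rw [not_and_or] at h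
        rcases h with h | h
        · exact le_trans (inner_le _ _ _) (Nat.le_of_not_lt h)
        · exact absurd hg h
    · split_ifs with h
      · exact ih _ hmem'
      · exact ih _ hmem'

-- outer fold (all positions)
theorem outer_le (f : List Char) (l : List Nat) (best : Nat) :
    l.foldl (riskScanStep f) best ≤ best := by
  induction l generalizing best with
  | nil => exact le_refl _
  | cons i l ih =>
    simp only [List.foldl_cons]
    exact le_trans (ih _) (inner_le _ _ _)

theorem outer_cases (f : List Char) (l : List Nat) (best : Nat) :
    l.foldl (riskScanStep f) best = best ∨
      ∃ i ∈ l, ∃ tp ∈ riskTerms, l.foldl (riskScanStep f) best = tp.2 ∧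
        PySem.Chars.startswith (f.drop i) tp.1 = true := by
  induction l generalizing best with
  | nil => exact Or.inl rfl
  | cons i l ih =>
    simp only [List.foldl_cons]
    rcases ih (riskScanStep f best i) with h | ⟨i', hi', tp', htp', h⟩
    · rw [h]
      rcases inner_cases (fun tp => PySem.Chars.startswith (f.drop i) tp.1) riskTerms best with
        h' | ⟨tp, htp, h'⟩
      · exact Or.inl h'
      · exact Or.inr ⟨i, List.mem_cons_self, tp, htp, h'⟩
    · exact Or.inr ⟨i', List.mem_cons_of_mem _ hi', tp', htp', h⟩

theorem outer_min (f : List Char) (l : List Nat) (best : Nat)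
    (i : Nat) (hi : i ∈ l) (tp : List Char × Nat) (htp : tp ∈ riskTerms)
    (hg : PySem.Chars.startswith (f.drop i) tp.1 = true) :
    l.foldl (riskScanStep f) best ≤ tp.2 := by
  induction l generalizing best with
  | nil => cases hi
  | cons i0 l ih =>
    simp only [List.foldl_cons]
    rcases List.mem_cons.1 hi with rfl | hi'
    · exact le_trans (outer_le _ _ _) (inner_min _ _ _ _ htp hg)
    · exact ih _ hi'

-- 'term in f' ↔ term starts at some position i < len f, for nonempty term
theorem exists_startswith_iff (t f : List Char) (ht : t ≠ []) :
    (∃ i ∈ List.range f.length, PySem.Chars.startswith (f.drop i) t = true) ↔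
      PySem.Chars.isIn t f = true := by
  rw [← PySem.Chars.exists_prefix_drop_iff_isIn]
  constructor
  · rintro ⟨i, _, h⟩
    exact ⟨i, (PySem.Chars.startswith_iff _ _).1 h⟩
  · rintro ⟨j, hp⟩
    by_cases hj : j < f.length
    · exact ⟨j, List.mem_range.2 hj, (PySem.Chars.startswith_iff _ _).2 hp⟩
    · exfalso
      rw [List.drop_eq_nil_of_le (Nat.le_of_not_lt hj)] at hp
      exact ht (List.prefix_nil.1 hp)

theorem riskTerms_ne_nil : ∀ tp ∈ riskTerms, tp.1 ≠ [] := by decide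

-- if some term of priority p matches at a position, the scan result is ≤ p
theorem scan_le_of_hit (f : List Char) (p : Nat) (h : riskHit f p) :
    (List.range f.length).foldl (riskScanStep f) 5 ≤ p := by
  obtain ⟨tp, htp, hp, hin⟩ := h
  obtain ⟨i, hi, hsw⟩ := (exists_startswith_iff tp.1 f (riskTerms_ne_nil tp htp)).2 hin
  exact hp ▸ outer_min f _ 5 i hi tp htp hsw

-- the scan result is 5 or a priority that actually occurs
theorem scan_cases (f : List Char) :
    (List.range f.length).foldl (riskScanStep f) 5 = 5 ∨
      riskHit f ((List.range f.length).foldl (riskScanStep f) 5) := by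
  rcases outer_cases f (List.range f.length) 5 with h | ⟨i, hi, tp, htp, h, hsw⟩
  · exact Or.inl h
  · refine Or.inr ⟨tp, htp, h.symm, ?_⟩
    exact (exists_startswith_iff tp.1 f (riskTerms_ne_nil tp htp)).1 ⟨i, hi, hsw⟩

theorem scan_le_five (f : List Char) :
    (List.range f.length).foldl (riskScanStep f) 5 ≤ 5 := outer_le f _ 5

-- riskHit in terms of the individual isIn tests (one lemma per priority)
theorem riskHit_zero (f : List Char) : riskHit f 0 ↔
    (PySem.Chars.isIn "financial".toList f = true ∨ PySem.Chars.isIn "revenue".toList f = true ∨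
     PySem.Chars.isIn "cash".toList f = true ∨ PySem.Chars.isIn "profit".toList f = true) := by
  simp [riskHit, riskTerms]
theorem riskHit_one (f : List Char) : riskHit f 1 ↔
    (PySem.Chars.isIn "legal".toList f = true ∨ PySem.Chars.isIn "contract".toList f = true ∨
     PySem.Chars.isIn "liability".toList f = true ∨ PySem.Chars.isIn "litigation".toList f = true) := by
  simp [riskHit, riskTerms]
theorem riskHit_two (f : List Char) : riskHit f 2 ↔
    (PySem.Chars.isIn "compliance".toList f = true ∨ PySem.Chars.isIn "regulatory".toList f = true ∨
     PySem.Chars.isIn "sox".toList f = true ∨ PySem.Chars.isIn "gdpr".toList f = true) := by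
  simp [riskHit, riskTerms]
theorem riskHit_three (f : List Char) : riskHit f 3 ↔
    (PySem.Chars.isIn "operational".toList f = true ∨ PySem.Chars.isIn "process".toList f = true ∨
     PySem.Chars.isIn "system".toList f = true) := by
  simp [riskHit, riskTerms]
theorem riskHit_four (f : List Char) : riskHit f 4 ↔
    (PySem.Chars.isIn "environmental".toList f = true ∨ PySem.Chars.isIn "safety".toList f = true ∨
     PySem.Chars.isIn "health".toList f = true) := by
  simp [riskHit, riskTerms]

theorem riskHit_le_four (f : List Char) (p : Nat) (h : riskHit f p) : p ≤ 4 := by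
  obtain ⟨tp, htp, hp, _⟩ := h
  have h4 : ∀ tp ∈ riskTerms, tp.2 ≤ 4 := by decide
  have := h4 tp htp
  omega

-- ===== VERDICT =====
theorem categorize_risk_flag_py_spec : Claim_equal_categorize_risk_flag_py := by
  intro flag _
  unfold Spec_categorize_risk_flag_py categorize_risk_flag_py categorize_risk_flag_py_alt
  simp only []
  set f := (PySem.Str.lower flag).toList with hf
  set r := (List.range f.length).foldl (riskScanStep f) 5 with hr
  have hle5 : r ≤ 5 := scan_le_five f
  have hcases := scan_cases f
  rw [← hr] at hcases
  have c0 : (["financial", "revenue", "cash", "profit"].any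
      (fun term => PySem.Str.isIn term (PySem.Str.lower flag))) = true ↔ riskHit f 0 := by
    rw [riskHit_zero]; simp [hf]
  have c1 : (["legal", "contract", "liability", "litigation"].any
      (fun term => PySem.Str.isIn term (PySem.Str.lower flag))) = true ↔ riskHit f 1 := by
    rw [riskHit_one]; simp [hf]
  have c2 : (["compliance", "regulatory", "sox", "gdpr"].any
      (fun term => PySem.Str.isIn term (PySem.Str.lower flag))) = true ↔ riskHit f 2 := by
    rw [riskHit_two]; simp [hf]
  have c3 : (["operational", "process", "system"].any
      (fun term => PySem.Str.isIn term (PySem.Str.lower flag))) = true ↔ riskHit f 3 := by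
    rw [riskHit_three]; simp [hf]
  have c4 : (["environmental", "safety", "health"].any
      (fun term => PySem.Str.isIn term (PySem.Str.lower flag))) = true ↔ riskHit f 4 := by
    rw [riskHit_four]; simp [hf]
  split_ifs with h0 h1 h2 h3 h4
  · have : r = 0 := Nat.le_zero.1 (scan_le_of_hit f 0 (c0.1 h0))
    rw [this]; rfl
  · have hn0 : ¬ riskHit f 0 := fun h => h0 (c0.2 h)
    have hle : r ≤ 1 := scan_le_of_hit f 1 (c1.1 h1)
    have : r = 1 := by
      rcases hcases with h5 | hhit
      · omega
      · interval_cases r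
        · exact absurd hhit hn0
        · rfl
    rw [this]; rfl
  · have hn0 : ¬ riskHit f 0 := fun h => h0 (c0.2 h)
    have hn1 : ¬ riskHit f 1 := fun h => h1 (c1.2 h)
    have hle : r ≤ 2 := scan_le_of_hit f 2 (c2.1 h2)
    have : r = 2 := by
      rcases hcases with h5 | hhit
      · omega
      · interval_cases r
        · exact absurd hhit hn0
        · exact absurd hhit hn1
        · rfl
    rw [this]; rfl
  · have hn0 : ¬ riskHit f 0 := fun h => h0 (c0.2 h)
    have hn1 : ¬ riskHit f 1 := fun h => h1 (c1.2 h)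
    have hn2 : ¬ riskHit f 2 := fun h => h2 (c2.2 h)
    have hle : r ≤ 3 := scan_le_of_hit f 3 (c3.1 h3)
    have : r = 3 := by
      rcases hcases with h5 | hhit
      · omega
      · interval_cases r
        · exact absurd hhit hn0
        · exact absurd hhit hn1
        · exact absurd hhit hn2
        · rfl
    rw [this]; rfl
  · have hn0 : ¬ riskHit f 0 := fun h => h0 (c0.2 h)
    have hn1 : ¬ riskHit f 1 := fun h => h1 (c1.2 h)
    have hn2 : ¬ riskHit f 2 := fun h => h2 (c2.2 h)
    have hn3 : ¬ riskHit f 3 := fun h => h3 (c3.2 h)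
    have hle : r ≤ 4 := scan_le_of_hit f 4 (c4.1 h4)
    have : r = 4 := by
      rcases hcases with h5 | hhit
      · omega
      · interval_cases r
        · exact absurd hhit hn0
        · exact absurd hhit hn1
        · exact absurd hhit hn2
        · exact absurd hhit hn3
        · rfl
    rw [this]; rfl
  · have hn0 : ¬ riskHit f 0 := fun h => h0 (c0.2 h)
    have hn1 : ¬ riskHit f 1 := fun h => h1 (c1.2 h)
    have hn2 : ¬ riskHit f 2 := fun h => h2 (c2.2 h)
    have hn3 : ¬ riskHit f 3 := fun h => h3 (c3.2 h)
    have hn4 : ¬ riskHit f 4 := fun h => h4 (c4.2 h)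
    have : r = 5 := by
      rcases hcases with h5 | hhit
      · exact h5
      · have := riskHit_le_four f r hhit
        interval_cases r
        · exact absurd hhit hn0
        · exact absurd hhit hn1
        · exact absurd hhit hn2
        · exact absurd hhit hn3
        · exact absurd hhit hn4
    rw [this]; rfl
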